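-- pv_equiv track=rewrite | github.com/gurujbc/footbag-platform | legacy_data/pipeline/adapters/curated_events_adapter.py | _build_block_variant_b
-- ===== SOURCE A (Python) =====
-- from collections import defaultdict
--
-- def _safe_place_int(s: str) -> int:
--     try:
--         return int(s)
--     except (ValueError, TypeError):
--         return 9999
--
-- def _build_block_variant_b(rows: list[dict]) -> tuple[str, list[str]]:
--     """
--     Variant B: player_1/player_2 schema.
--     player_2 populated → doubles team "P1 / P2".
--     """
--     warnings: list[str] = []
--     out_lines: list[str] = []
--
--     div_order: list[str] = []
--     by_div: dict[str, list[dict]] = defaultdict(list)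
--     for r in rows:
--         div = r.get("division", "").strip()
--         if not div:
--             continue
--         if div not in by_div:
--             div_order.append(div)
--         by_div[div].append(r)
--
--     for div in div_order:
--         div_rows = sorted(by_div[div], key=lambda r: _safe_place_int(r.get("place", "")))
--         out_lines.append(div)
--         for r in div_rows:
--             p1    = r.get("player_1", "").strip()
--             p2    = r.get("player_2", "").strip()
--             place = r.get("place", "").strip()
--             if not p1:
--                 warnings.append(f"empty_player_1:{div!r}:p{place}")
--                 continue
--             entry = f"{p1} / {p2}" if p2 else p1
--             out_lines.append(f"{place}. {entry}")
--         out_lines.append("")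
--
--     while out_lines and out_lines[-1] == "":
--         out_lines.pop()
--
--     return "\n".join(out_lines).strip(), warnings
-- ===== SOURCE B (Python) =====
-- # B: no dict-of-lists; repeatedly peel off the first-seen division from one
-- # filtered worklist and emit its block directly, joining blocks with "\n\n"
-- # instead of append-""-then-pop bookkeeping.
-- def _safe_place_int(s: str) -> int:
--     try:
--         return int(s)
--     except (ValueError, TypeError):
--         return 9999
--
-- def _build_block_variant_b(rows: list[dict]) -> tuple[str, list[str]]:
--     warnings: list[str] = []
--     blocks: list[str] = []
--     pending = [r for r in rows if r.get("division", "").strip()]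
--     while pending:
--         div = pending[0].get("division", "").strip()
--         group = [r for r in pending if r.get("division", "").strip() == div]
--         pending = [r for r in pending if r.get("division", "").strip() != div]
--         lines = [div]
--         for r in sorted(group, key=lambda r: _safe_place_int(r.get("place", ""))):
--             p1 = r.get("player_1", "").strip()
--             p2 = r.get("player_2", "").strip()
--             place = r.get("place", "").strip()
--             if not p1:
--                 warnings.append(f"empty_player_1:{div!r}:p{place}")
--                 continue
--             lines.append(f"{place}. {p1} / {p2}" if p2 else f"{place}. {p1}")
--         blocks.append("\n".join(lines))
--     return "\n\n".join(blocks).strip(), warnings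
-- ===== Notes on version B (the rewrite author's own statement) =====
-- stated objective: simpler
-- what changed: B drops A's defaultdict-plus-div_order index and the append-empty-line-then-pop bookkeeping: it repeatedly peels the first-seen division off one pre-filtered worklist, emits each division's block as a single string, and joins blocks with a blank line.
import Mathlib
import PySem

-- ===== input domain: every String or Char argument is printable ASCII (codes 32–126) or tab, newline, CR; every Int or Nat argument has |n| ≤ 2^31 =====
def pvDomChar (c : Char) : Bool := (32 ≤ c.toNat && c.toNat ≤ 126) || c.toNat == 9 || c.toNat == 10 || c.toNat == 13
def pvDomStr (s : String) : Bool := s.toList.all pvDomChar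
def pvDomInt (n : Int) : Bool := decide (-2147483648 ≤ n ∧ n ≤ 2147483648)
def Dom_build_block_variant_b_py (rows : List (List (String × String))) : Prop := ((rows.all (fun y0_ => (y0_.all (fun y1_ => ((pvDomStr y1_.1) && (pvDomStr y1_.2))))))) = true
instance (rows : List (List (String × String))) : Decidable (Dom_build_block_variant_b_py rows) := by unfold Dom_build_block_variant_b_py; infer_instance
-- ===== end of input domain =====

-- B replaces A's defaultdict/div_order indexing and append-""-then-pop bookkeeping by
-- peeling the first-seen division off one filtered worklist and joining blocks with "\n\n"
-- (objective: simpler; same return value).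

-- shared module-level helpers (both Pythons use the same dict-get, _safe_place_int and repr())
def pvGet (r : List (String × String)) (k : String) : String := (PySem.Dict.ofList r).getD k ""

def safe_place_int (s : String) : Int := (PySem.Int.ofStr? s).getD 9999

-- hand port of Python's repr() on str: exact for printable-ASCII + tab/newline/CR strings (the Dom_ charset)
def pvReprChar (q c : Char) : List Char :=
  if c = '\\' then ['\\', '\\']
  else if c = q then ['\\', q]
  else if c = '\t' then ['\\', 't']
  else if c = '\n' then ['\\', 'n']
  else if c = '\r' then ['\\', 'r']
  else [c]

def pyRepr (s : String) : String :=
  let cs := s.toList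
  let q : Char := if cs.contains '\'' && !cs.contains '"' then '"' else '\''
  String.ofList (q :: (cs.flatMap (pvReprChar q) ++ [q]))

def warnStr (div place : String) : String := "empty_player_1:" ++ pyRepr div ++ ":p" ++ place

def pvDiv (r : List (String × String)) : String := PySem.Str.strip (pvGet r "division")

-- ===== PORT A =====
-- loop bodies of A, named (same state, same branches as the Python loops)
def pass1step (st : List String × PySem.Dict String (List (List (String × String))))
    (r : List (String × String)) :
    List String × PySem.Dict String (List (List (String × String))) :=
  let div := pvDiv r
  if div = "" then st
  else
    let ord := if st.2.contains div then st.1 else st.1 ++ [div]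
    (ord, st.2.insert div (st.2.getD div [] ++ [r]))

def innerStepA (div : String) (a : List String × List String) (r : List (String × String)) :
    List String × List String :=
  let p1s := PySem.Str.strip (pvGet r "player_1")
  let p2s := PySem.Str.strip (pvGet r "player_2")
  let place := PySem.Str.strip (pvGet r "place")
  if p1s = "" then (a.1, a.2 ++ [warnStr div place])
  else
    let entry := if p2s ≠ "" then p1s ++ " / " ++ p2s else p1s
    (a.1 ++ [place ++ ". " ++ entry], a.2)

def outStepA (dd : PySem.Dict String (List (List (String × String))))
    (acc : List String × List String) (div : String) : List String × List String :=
  let div_rows := PySem.List.sorted (dd.getD div []) (fun r => safe_place_int (pvGet r "place")) false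
  let acc1 : List String × List String := (acc.1 ++ [div], acc.2)
  let acc2 := div_rows.foldl (innerStepA div) acc1
  (acc2.1 ++ [""], acc2.2)

def build_block_variant_b_py (rows : List (List (String × String))) : String × List String :=
  let p1 := rows.foldl pass1step ([], PySem.Dict.empty)
  let ow := p1.1.foldl (outStepA p1.2) ([], [])
  -- while out_lines and out_lines[-1] == "": out_lines.pop()  (exact: drops the trailing "" lines)
  let out_lines := (ow.1.reverse.dropWhile (· == "")).reverse
  (PySem.Str.strip (PySem.Str.join "\n" out_lines), ow.2)

-- ===== PORT B =====
-- body of B's per-row loop, named (same state, same branches as the Python loop)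
def innerStepB (div : String) (a : List String × List String) (r : List (String × String)) :
    List String × List String :=
  let p1s := PySem.Str.strip (pvGet r "player_1")
  let p2s := PySem.Str.strip (pvGet r "player_2")
  let place := PySem.Str.strip (pvGet r "place")
  if p1s = "" then (a.1, a.2 ++ [warnStr div place])
  else (a.1 ++ [if p2s ≠ "" then place ++ ". " ++ p1s ++ " / " ++ p2s
                else place ++ ". " ++ p1s], a.2)

def bLoop (pending : List (List (String × String))) (blocks warnings : List String) :
    List String × List String :=
  match pending with
  | [] => (blocks, warnings)
  | r0 :: tl =>
    let div := pvDiv r0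
    let group := (r0 :: tl).filter (fun r => pvDiv r == div)
    let st := (PySem.List.sorted group (fun r => safe_place_int (pvGet r "place")) false).foldl
      (innerStepB div) ([div], warnings)
    bLoop ((r0 :: tl).filter (fun r => pvDiv r != div)) (blocks ++ [PySem.Str.join "\n" st.1]) st.2
termination_by pending.length
decreasing_by
  simp only [pvDiv, List.filter_cons, bne_self_eq_false, List.length_cons]
  exact Nat.lt_succ_of_le (List.length_filter_le _ _)

def build_block_variant_b_py_alt (rows : List (List (String × String))) : String × List String :=
  let pending := rows.filter (fun r => pvDiv r != "")
  let bw := bLoop pending [] []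
  (PySem.Str.strip (PySem.Str.join "\n\n" bw.1), bw.2)

-- ===== PRECONDITION & SPEC =====
def Spec_build_block_variant_b_py (rows : List (List (String × String))) (out : String × List String) : Prop := out = build_block_variant_b_py_alt rows
instance (rows : List (List (String × String))) (out : String × List String) : Decidable (Spec_build_block_variant_b_py rows out) := by unfold Spec_build_block_variant_b_py; infer_instance

-- ===== CLAIM (what is proved, stated in full; the proofs are below) =====
def Claim_equal_build_block_variant_b_py : Prop := ∀ (rows : List (List (String × String))), Dom_build_block_variant_b_py rows → Spec_build_block_variant_b_py rows (build_block_variant_b_py rows)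

-- ===== LEMMAS AND PROOFS =====

-- the lines / warnings one row contributes, and one division's block
def rowLine (r : List (String × String)) : List String :=
  if PySem.Str.strip (pvGet r "player_1") = "" then []
  else [PySem.Str.strip (pvGet r "place") ++ ". " ++
        (if PySem.Str.strip (pvGet r "player_2") ≠ "" then
           PySem.Str.strip (pvGet r "player_1") ++ " / " ++ PySem.Str.strip (pvGet r "player_2")
         else PySem.Str.strip (pvGet r "player_1"))]

def rowWarn (div : String) (r : List (String × String)) : List String :=
  if PySem.Str.strip (pvGet r "player_1") = "" then
    [warnStr div (PySem.Str.strip (pvGet r "place"))]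
  else []

def blockOf (d : String) (rs : List (List (String × String))) : List String :=
  d :: (PySem.List.sorted rs (fun r => safe_place_int (pvGet r "place")) false).flatMap rowLine

def warnOf (d : String) (rs : List (List (String × String))) : List String :=
  (PySem.List.sorted rs (fun r => safe_place_int (pvGet r "place")) false).flatMap (rowWarn d)

-- first-seen grouping of a worklist (B's recursion scheme, as a spec)
def groupsSpec : List (List (String × String)) → List (String × List (List (String × String)))
  | [] => []
  | r0 :: tl =>
    (pvDiv r0, (r0 :: tl).filter (fun r => pvDiv r == pvDiv r0)) ::
      groupsSpec ((r0 :: tl).filter (fun r => pvDiv r != pvDiv r0))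
termination_by l => l.length
decreasing_by
  simp only [List.filter_cons, bne_self_eq_false, if_false, List.length_cons]
  exact Nat.lt_succ_of_le (List.length_filter_le _ _)

-- the divisions A's first pass appends, relative to the already-seen ones
def newOrd : List (List (String × String)) → List String → List String
  | [], _ => []
  | r :: t, seen =>
    if pvDiv r = "" then newOrd t seen
    else if pvDiv r ∈ seen then newOrd t seen
    else pvDiv r :: newOrd t (seen ++ [pvDiv r])

theorem mem_newOrd {l : List (List (String × String))} {seen : List String} {e : String}
    (h : e ∈ newOrd l seen) : e ∉ seen ∧ e ≠ "" := by
  induction l generalizing seen with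
  | nil => simp [newOrd] at h
  | cons r t ih =>
    simp only [newOrd] at h
    split_ifs at h with h1 h2
    · exact ih h
    · exact ih h
    · rcases List.mem_cons.mp h with rfl | h3
      · exact ⟨h2, h1⟩
      · have := ih h3
        refine ⟨fun hc => this.1 (List.mem_append_left _ hc), this.2⟩

theorem pass1_char (l : List (List (String × String))) (o : List String)
    (dd : PySem.Dict String (List (List (String × String))))
    (hinv : ∀ d, dd.contains d = true ↔ d ∈ o) :
    (l.foldl pass1step (o, dd)).1 = o ++ newOrd l o ∧
    ∀ d, d ≠ "" →
      (l.foldl pass1step (o, dd)).2.getD d [] =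
        dd.getD d [] ++ l.filter (fun r => pvDiv r == d) := by
  induction l generalizing o dd with
  | nil => simp [newOrd]
  | cons r t ih =>
    simp only [List.foldl_cons]
    by_cases h0 : pvDiv r = ""
    · rw [show pass1step (o, dd) r = (o, dd) from by simp [pass1step, h0]]
      obtain ⟨ih1, ih2⟩ := ih o dd hinv
      refine ⟨?_, ?_⟩
      · rw [ih1]
        simp [newOrd, h0]
      · intro d hd
        rw [ih2 d hd]
        have : (pvDiv r == d) = false := by
          rw [beq_eq_false_iff_ne]
          exact fun hc => hd (h0 ▸ hc).symm
        simp [List.filter_cons, this]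
    · by_cases hc : dd.contains (pvDiv r) = true
      · have hmem : pvDiv r ∈ o := (hinv _).mp hc
        rw [show pass1step (o, dd) r = (o, dd.insert (pvDiv r) (dd.getD (pvDiv r) [] ++ [r]))
              from by simp [pass1step, h0, hc]]
        have hinv' : ∀ d, (dd.insert (pvDiv r) (dd.getD (pvDiv r) [] ++ [r])).contains d = true ↔ d ∈ o := by
          intro d
          rw [PySem.Dict.contains_insert]
          by_cases hdr : d = pvDiv r
          · subst hdr
            simp [hmem]
          · simp [hinv d, beq_eq_false_iff_ne.mpr hdr]
        obtain ⟨ih1, ih2⟩ := ih o _ hinv'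
        refine ⟨?_, ?_⟩
        · rw [ih1]
          simp [newOrd, h0, hmem]
        · intro d hd
          rw [ih2 d hd]
          by_cases hdr : d = pvDiv r
          · subst hdr
            rw [PySem.Dict.getD_insert_self]
            simp [List.filter_cons]
          · rw [PySem.Dict.getD_insert_of_ne dd _ _ hdr]
            have : (pvDiv r == d) = false := beq_eq_false_iff_ne.mpr (fun h => hdr h.symm)
            simp [List.filter_cons, this]
      · have hmem : pvDiv r ∉ o := fun h => hc ((hinv _).mpr h)
        rw [show pass1step (o, dd) r =
              (o ++ [pvDiv r], dd.insert (pvDiv r) (dd.getD (pvDiv r) [] ++ [r]))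
              from by simp [pass1step, h0, hc]]
        have hinv' : ∀ d, (dd.insert (pvDiv r) (dd.getD (pvDiv r) [] ++ [r])).contains d = true ↔
            d ∈ o ++ [pvDiv r] := by
          intro d
          rw [PySem.Dict.contains_insert]
          by_cases hdr : d = pvDiv r
          · subst hdr
            simp
          · simp [hinv d, beq_eq_false_iff_ne.mpr hdr, hdr]
        obtain ⟨ih1, ih2⟩ := ih (o ++ [pvDiv r]) _ hinv'
        refine ⟨?_, ?_⟩
        · rw [ih1]
          simp [newOrd, h0, hmem]
        · intro d hd
          rw [ih2 d hd]
          by_cases hdr : d = pvDiv r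
          · subst hdr
            rw [PySem.Dict.getD_insert_self]
            simp [List.filter_cons]
          · rw [PySem.Dict.getD_insert_of_ne dd _ _ hdr]
            have : (pvDiv r == d) = false := beq_eq_false_iff_ne.mpr (fun h => hdr h.symm)
            simp [List.filter_cons, this]

theorem newOrd_filter (l : List (List (String × String))) (seen : List String) :
    newOrd (l.filter (fun r => pvDiv r != "")) seen = newOrd l seen := by
  induction l generalizing seen with
  | nil => rfl
  | cons r t ih =>
    by_cases h : pvDiv r = ""
    · simp [List.filter_cons, h, newOrd, ih]
    · simp [List.filter_cons, h, newOrd, ih]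

theorem innerA_char (div : String) (rs : List (List (String × String))) (l0 w0 : List String) :
    rs.foldl (innerStepA div) (l0, w0) =
      (l0 ++ rs.flatMap rowLine, w0 ++ rs.flatMap (rowWarn div)) := by
  induction rs generalizing l0 w0 with
  | nil => simp
  | cons r t ih =>
    simp only [List.foldl_cons]
    by_cases h1 : PySem.Str.strip (pvGet r "player_1") = ""
    · rw [show innerStepA div (l0, w0) r =
            (l0, w0 ++ [warnStr div (PySem.Str.strip (pvGet r "place"))])
            from by simp [innerStepA, h1]]
      rw [ih]
      simp [rowLine, rowWarn, h1]
    · rw [show innerStepA div (l0, w0) r =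
            (l0 ++ [PySem.Str.strip (pvGet r "place") ++ ". " ++
              (if PySem.Str.strip (pvGet r "player_2") ≠ "" then
                 PySem.Str.strip (pvGet r "player_1") ++ " / " ++ PySem.Str.strip (pvGet r "player_2")
               else PySem.Str.strip (pvGet r "player_1"))], w0)
            from by simp [innerStepA, h1]]
      rw [ih]
      simp [rowLine, rowWarn, h1]

theorem innerBA (div : String) (a : List String × List String) (r : List (String × String)) :
    innerStepB div a r = innerStepA div a r := by
  by_cases h1 : PySem.Str.strip (pvGet r "player_1") = ""
  · simp [innerStepA, innerStepB, h1]
  · by_cases h2 : PySem.Str.strip (pvGet r "player_2") = ""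
    · simp [innerStepA, innerStepB, h1, h2]
    · simp [innerStepA, innerStepB, h1, h2, String.append_assoc]

theorem innerB_char (div : String) (rs : List (List (String × String))) (l0 w0 : List String) :
    rs.foldl (innerStepB div) (l0, w0) =
      (l0 ++ rs.flatMap rowLine, w0 ++ rs.flatMap (rowWarn div)) := by
  rw [PySem.List.foldl_congr_mem rs (innerStepB div) (innerStepA div) (l0, w0)
        (fun a x _ => innerBA div a x)]
  exact innerA_char div rs l0 w0

theorem outerA_char (dd : PySem.Dict String (List (List (String × String))))
    (o : List String) (acc : List String × List String) :
    o.foldl (outStepA dd) acc =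
      (acc.1 ++ o.flatMap (fun d => blockOf d (dd.getD d []) ++ [""]),
       acc.2 ++ o.flatMap (fun d => warnOf d (dd.getD d []))) := by
  induction o generalizing acc with
  | nil => simp
  | cons d o ih =>
    simp only [List.foldl_cons]
    have hstep : outStepA dd acc d =
        (acc.1 ++ (blockOf d (dd.getD d []) ++ [""]), acc.2 ++ warnOf d (dd.getD d [])) := by
      simp only [outStepA, innerA_char, blockOf, warnOf]
      simp [List.append_assoc]
    rw [hstep, ih]
    simp [List.append_assoc]

set_option maxHeartbeats 1000000 in
theorem groups_eq (m : List (List (String × String))) (s : List String)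
    (hm : ∀ r ∈ m, pvDiv r ≠ "") :
    (newOrd m s).map (fun d => (d, m.filter (fun r => pvDiv r == d))) =
      groupsSpec (m.filter (fun r => decide (pvDiv r ∉ s))) := by
  induction m generalizing s with
  | nil => simp [newOrd, groupsSpec]
  | cons r t ih =>
    have hd0 : pvDiv r ≠ "" := hm r (List.mem_cons_self)
    have hmt : ∀ x ∈ t, pvDiv x ≠ "" := fun x hx => hm x (List.mem_cons_of_mem _ hx)
    by_cases hs : pvDiv r ∈ s
    · rw [show newOrd (r :: t) s = newOrd t s from by simp [newOrd, hd0, hs]]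
      rw [show (r :: t).filter (fun x => decide (pvDiv x ∉ s)) =
            t.filter (fun x => decide (pvDiv x ∉ s)) from by simp [List.filter_cons, hs]]
      rw [← ih s hmt]
      apply List.map_congr_left
      intro e he
      have hes : e ∉ s := (mem_newOrd he).1
      have : (pvDiv r == e) = false := beq_eq_false_iff_ne.mpr (fun h => hes (h ▸ hs))
      simp [List.filter_cons, this]
    · rw [show newOrd (r :: t) s = pvDiv r :: newOrd t (s ++ [pvDiv r]) from by
            simp [newOrd, hd0, hs]]
      rw [List.map_cons]
      rw [show (r :: t).filter (fun x => decide (pvDiv x ∉ s)) =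
            r :: t.filter (fun x => decide (pvDiv x ∉ s)) from by simp [List.filter_cons, hs]]
      rw [groupsSpec]
      congr 1
      · congr 1
        rw [show (r :: t).filter (fun x => pvDiv x == pvDiv r) =
              r :: t.filter (fun x => pvDiv x == pvDiv r) from by simp [List.filter_cons]]
        rw [show (r :: t.filter (fun x => decide (pvDiv x ∉ s))).filter
              (fun x => pvDiv x == pvDiv r) =
              r :: (t.filter (fun x => decide (pvDiv x ∉ s))).filter
                (fun x => pvDiv x == pvDiv r) from by simp [List.filter_cons]]
        rw [List.filter_filter]
        congr 1
        apply List.filter_congr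
        intro x _
        by_cases hx : pvDiv x = pvDiv r
        · simp [hx, hs]
        · simp [beq_eq_false_iff_ne.mpr hx]
      · rw [show (r :: t.filter (fun x => decide (pvDiv x ∉ s))).filter
              (fun x => pvDiv x != pvDiv r) =
              (t.filter (fun x => decide (pvDiv x ∉ s))).filter
                (fun x => pvDiv x != pvDiv r) from by simp [List.filter_cons]]
        rw [List.filter_filter]
        rw [show (t.filter fun x => (pvDiv x != pvDiv r) && decide (pvDiv x ∉ s)) =
              t.filter (fun x => decide (pvDiv x ∉ s ++ [pvDiv r])) from by
            apply List.filter_congr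
            intro x _
            by_cases hx : pvDiv x = pvDiv r
            · simp [hx]
            · by_cases hxs : pvDiv x ∈ s
              · simp [hxs, hx]
              · simp [hxs, hx]]
        rw [← ih (s ++ [pvDiv r]) hmt]
        apply List.map_congr_left
        intro e he
        have hes : e ∉ s ++ [pvDiv r] := (mem_newOrd he).1
        have her : e ≠ pvDiv r := fun h => hes (by simp [h])
        have : (pvDiv r == e) = false := beq_eq_false_iff_ne.mpr (fun h => her h.symm)
        simp [List.filter_cons, this]

theorem A_char (rows : List (List (String × String))) :
    build_block_variant_b_py rows =
      (PySem.Str.strip (PySem.Str.join "\n"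
        ((((groupsSpec (rows.filter (fun r => pvDiv r != ""))).flatMap
            (fun g => blockOf g.1 g.2 ++ [""])).reverse.dropWhile (· == "")).reverse)),
       (groupsSpec (rows.filter (fun r => pvDiv r != ""))).flatMap (fun g => warnOf g.1 g.2)) := by
  obtain ⟨h1, h2⟩ := pass1_char rows [] PySem.Dict.empty
    (by intro d; simp [PySem.Dict.contains_empty])
  have hkept : ∀ r ∈ rows.filter (fun r => pvDiv r != ""), pvDiv r ≠ "" := by
    intro r hr
    simpa using List.of_mem_filter hr
  have hgetD : ∀ d, d ≠ "" →
      (rows.foldl pass1step ([], PySem.Dict.empty)).2.getD d [] =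
        rows.filter (fun r => pvDiv r == d) := by
    intro d hd
    rw [h2 d hd, PySem.Dict.getD_empty, List.nil_append]
  have hflat : ∀ (F : String → List (List (String × String)) → List String),
      (newOrd rows []).flatMap
          (fun d => F d ((rows.foldl pass1step ([], PySem.Dict.empty)).2.getD d [])) =
        (groupsSpec (rows.filter (fun r => pvDiv r != ""))).flatMap (fun g => F g.1 g.2) := by
    intro F
    have step1 : (newOrd rows []).flatMap
          (fun d => F d ((rows.foldl pass1step ([], PySem.Dict.empty)).2.getD d [])) =
        (newOrd rows []).flatMap
          (fun d => F d ((rows.filter (fun r => pvDiv r != "")).filter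
            (fun r => pvDiv r == d))) := by
      rw [List.flatMap_def, List.flatMap_def]
      apply congrArg
      apply List.map_congr_left
      intro d hd
      have hdne : d ≠ "" := (mem_newOrd hd).2
      rw [hgetD d hdne]
      congr 1
      rw [List.filter_filter]
      apply List.filter_congr
      intro x _
      by_cases hx : pvDiv x = d
      · simp [hx, hdne]
      · simp [beq_eq_false_iff_ne.mpr hx]
    rw [step1, ← List.flatMap_map (fun d => (d, (rows.filter (fun r => pvDiv r != "")).filter
          (fun r => pvDiv r == d))) (fun g => F g.1 g.2), ← newOrd_filter rows [],
        groups_eq (rows.filter (fun r => pvDiv r != "")) [] hkept]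
    simp
  unfold build_block_variant_b_py
  simp only [outerA_char, h1, List.nil_append]
  rw [show (newOrd rows []).flatMap
        (fun d => blockOf d ((rows.foldl pass1step ([], PySem.Dict.empty)).2.getD d []) ++ [""]) =
      (groupsSpec (rows.filter (fun r => pvDiv r != ""))).flatMap
        (fun g => blockOf g.1 g.2 ++ [""]) from hflat (fun d rs => blockOf d rs ++ [""])]
  rw [hflat warnOf]

set_option maxHeartbeats 2000000 in
theorem bLoop_char (pending : List (List (String × String))) (blocks warns : List String)
    (hp : ∀ r ∈ pending, pvDiv r ≠ "") :
    bLoop pending blocks warns =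
      (blocks ++ (groupsSpec pending).map (fun g => PySem.Str.join "\n" (blockOf g.1 g.2)),
       warns ++ (groupsSpec pending).flatMap (fun g => warnOf g.1 g.2)) := by
  have key : ∀ (n : Nat) (pending : List (List (String × String))) (blocks warns : List String),
      pending.length ≤ n → (∀ r ∈ pending, pvDiv r ≠ "") →
      bLoop pending blocks warns =
        (blocks ++ (groupsSpec pending).map (fun g => PySem.Str.join "\n" (blockOf g.1 g.2)),
         warns ++ (groupsSpec pending).flatMap (fun g => warnOf g.1 g.2)) := by
    intro n
    induction n with
    | zero =>
      intro pending blocks warns hlen _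
      have : pending = [] := List.length_eq_zero_iff.mp (Nat.le_zero.mp hlen)
      subst this
      simp [bLoop, groupsSpec]
    | succ n ihn =>
      intro pending blocks warns hlen hp
      cases pending with
      | nil => simp [bLoop, groupsSpec]
      | cons r0 tl =>
        simp only [bLoop]
        rw [innerB_char]
        have hlen' : ((r0 :: tl).filter (fun r => pvDiv r != pvDiv r0)).length ≤ n := by
          rw [List.filter_cons]
          simp only [bne_self_eq_false, Bool.false_eq_true, if_false]
          exact le_trans (List.length_filter_le _ _) (Nat.le_of_succ_le_succ hlen)
        rw [ihn _ _ _ hlen' (fun r hr => hp r (List.mem_of_mem_filter hr))]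
        rw [groupsSpec]
        simp only [List.map_cons, List.flatMap_cons]
        rw [Prod.mk.injEq]
        constructor
        · rw [show blockOf (pvDiv r0) ((r0 :: tl).filter (fun r => pvDiv r == pvDiv r0)) =
                [pvDiv r0] ++ (PySem.List.sorted ((r0 :: tl).filter (fun r => pvDiv r == pvDiv r0))
                  (fun r => safe_place_int (pvGet r "place")) false).flatMap rowLine from rfl]
          simp [List.append_assoc]
        · simp [warnOf, List.append_assoc]
  exact key pending.length pending blocks warns le_rfl hp

-- string-level join facts
theorem sjoin_nil (sep : String) : PySem.Str.join sep [] = "" := by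
  exact String.toList_inj.mp (by simp [PySem.Str.toList_join, PySem.Chars.join_nil])

theorem sjoin_singleton (sep p : String) : PySem.Str.join sep [p] = p := by
  exact String.toList_inj.mp (by simp [PySem.Str.toList_join, PySem.Chars.join_singleton])

theorem sjoin_cons_cons (sep p q : String) (rest : List String) :
    PySem.Str.join sep (p :: q :: rest) = p ++ sep ++ PySem.Str.join sep (q :: rest) := by
  exact String.toList_inj.mp (by
    simp [PySem.Str.toList_join, PySem.Chars.join_cons_cons, String.toList_append])

theorem sjoin_append (sep : String) (u v : List String) (hu : u ≠ []) (hv : v ≠ []) :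
    PySem.Str.join sep (u ++ v) = PySem.Str.join sep u ++ sep ++ PySem.Str.join sep v := by
  induction u with
  | nil => exact absurd rfl hu
  | cons x u ih =>
    cases u with
    | nil =>
      cases v with
      | nil => exact absurd rfl hv
      | cons q r => simp [sjoin_cons_cons, sjoin_singleton]
    | cons y u' =>
      have h1 : (y :: u') ++ v = y :: (u' ++ v) := rfl
      calc PySem.Str.join sep (x :: (y :: u') ++ v)
          = x ++ sep ++ PySem.Str.join sep ((y :: u') ++ v) := by
            rw [show (x :: (y :: u') ++ v) = x :: y :: (u' ++ v) from rfl, sjoin_cons_cons]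
            rw [h1]
        _ = x ++ sep ++ (PySem.Str.join sep (y :: u') ++ sep ++ PySem.Str.join sep v) := by
            rw [ih (by simp) ]
        _ = PySem.Str.join sep (x :: y :: u') ++ sep ++ PySem.Str.join sep v := by
            rw [sjoin_cons_cons]
            simp [String.append_assoc]

theorem line_ne (a b : String) : a ++ ". " ++ b ≠ "" := by
  intro h
  have := congrArg String.toList h
  simp [String.toList_append] at this

theorem mem_blockOf_ne {d : String} {rs : List (List (String × String))} (hd : d ≠ "")
    {x : String} (hx : x ∈ blockOf d rs) : x ≠ "" := by
  rcases List.mem_cons.mp hx with rfl | h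
  · exact hd
  · rcases List.mem_flatMap.mp h with ⟨r, _, hr⟩
    unfold rowLine at hr
    split_ifs at hr with h1 h2
    · simp at hr
    · rcases List.mem_singleton.mp hr with rfl
      exact line_ne _ _
    · rcases List.mem_singleton.mp hr with rfl
      exact line_ne _ _

theorem groupsSpec_key_ne (l : List (List (String × String))) (hl : ∀ r ∈ l, pvDiv r ≠ "") :
    ∀ g ∈ groupsSpec l, g.1 ≠ "" := by
  induction l using groupsSpec.induct with
  | case1 => simp [groupsSpec]
  | case2 r0 tl ih =>
    intro g hg
    rw [groupsSpec] at hg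
    rcases List.mem_cons.mp hg with rfl | hg
    · exact hl _ (List.mem_cons_self)
    · exact ih (fun r hr => hl r (List.mem_of_mem_filter hr)) g hg

theorem popT_flat (bs : List (List String)) (h : ∀ b ∈ bs, b ≠ [] ∧ ∀ x ∈ b, x ≠ "") :
    ((bs.flatMap (· ++ [""])).reverse.dropWhile (· == "")).reverse =
      (bs.flatMap (· ++ [""])).dropLast := by
  have key : ∀ bs : List (List String), (∀ b ∈ bs, b ≠ [] ∧ ∀ x ∈ b, x ≠ "") →
      ((bs.flatMap (· ++ [""])).reverse.dropWhile (· == "")).reverse =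
        (bs.flatMap (· ++ [""])).dropLast ∧
      (bs ≠ [] → (bs.flatMap (· ++ [""])).dropLast ≠ []) := by
    intro bs
    induction bs with
    | nil => intro _; simp
    | cons b bs ih =>
      intro h
      obtain ⟨hbne, hbx⟩ := h b (List.mem_cons_self)
      have ih' := ih (fun b' hb' => h b' (List.mem_cons_of_mem _ hb'))
      cases bs with
      | nil =>
        constructor
        · show (((b ++ [""]) ++ []).reverse.dropWhile (· == "")).reverse = ((b ++ [""]) ++ []).dropLast
          rw [List.append_nil, List.reverse_append, List.dropLast_concat]
          show ((("" :: []).reverse ++ b.reverse).dropWhile (· == "")).reverse = b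
          simp only [List.reverse_cons, List.reverse_nil, List.nil_append, List.cons_append,
            List.nil_append, List.dropWhile_cons]
          have hdw : b.reverse.dropWhile (· == "") = b.reverse := by
            cases hbr : b.reverse with
            | nil => simp
            | cons x xs =>
              have hx : x ≠ "" := hbx x (by
                have : x ∈ b.reverse := by rw [hbr]; exact List.mem_cons_self
                exact List.mem_reverse.mp this)
              simp [List.dropWhile_cons, hx]
          simpa [hdw] using rfl
        · intro _
          simpa [List.dropLast_concat] using hbne
      | cons b' bs' =>
        have hrest : (b' :: bs').flatMap (· ++ [""]) ≠ [] := by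
          simp [List.flatMap_cons]
        have hdl : ((b' :: bs').flatMap (· ++ [""])).dropLast ≠ [] := ih'.2 (by simp)
        have hne : ((((b' :: bs').flatMap (· ++ [""])).reverse).dropWhile (· == "")).isEmpty = false := by
          rw [List.isEmpty_eq_false_iff]
          intro hc
          apply hdl
          rw [← ih'.1, hc, List.reverse_nil]
        constructor
        · show ((((b ++ [""]) ++ (b' :: bs').flatMap (· ++ [""])).reverse.dropWhile (· == ""))).reverse =
            ((b ++ [""]) ++ (b' :: bs').flatMap (· ++ [""])).dropLast
          rw [List.reverse_append, List.dropWhile_append, hne]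
          simp only [Bool.false_eq_true, if_false]
          rw [List.reverse_append, List.reverse_reverse, ih'.1,
              List.dropLast_append, List.isEmpty_eq_false_iff.mpr hrest]
          simp
        · intro _
          show ((b ++ [""]) ++ (b' :: bs').flatMap (· ++ [""])).dropLast ≠ []
          rw [List.dropLast_append, List.isEmpty_eq_false_iff.mpr hrest]
          simp [hbne]
  exact (key bs h).1

theorem join_dropLast (bs : List (List String)) (h : ∀ b ∈ bs, b ≠ []) :
    PySem.Str.join "\n" ((bs.flatMap (· ++ [""])).dropLast) =
      PySem.Str.join "\n\n" (bs.map (PySem.Str.join "\n")) := by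
  induction bs with
  | nil => simp [sjoin_nil]
  | cons b bs ih =>
    have hbne : b ≠ [] := h b (List.mem_cons_self)
    cases bs with
    | nil =>
      show PySem.Str.join "\n" (((b ++ [""]) ++ []).dropLast) = PySem.Str.join "\n\n" [PySem.Str.join "\n" b]
      rw [List.append_nil, List.dropLast_concat, sjoin_singleton]
    | cons b' bs' =>
      have hb' : b' ≠ [] := h b' (by simp)
      have ih' := ih (fun x hx => h x (List.mem_cons_of_mem _ hx))
      have hrest : (b' :: bs').flatMap (· ++ [""]) ≠ [] := by simp [List.flatMap_cons]
      have hlen : 2 ≤ ((b' :: bs').flatMap (· ++ [""])).length := by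
        rw [List.flatMap_cons, List.length_append, List.length_append]
        cases b' with
        | nil => exact absurd rfl hb'
        | cons c cs => simp; omega
      have hdl : ((b' :: bs').flatMap (· ++ [""])).dropLast ≠ [] := by
        apply List.ne_nil_of_length_pos
        rw [List.length_dropLast]
        omega
      show PySem.Str.join "\n" (((b ++ [""]) ++ (b' :: bs').flatMap (· ++ [""])).dropLast) =
        PySem.Str.join "\n\n" (PySem.Str.join "\n" b :: (b' :: bs').map (PySem.Str.join "\n"))
      rw [List.dropLast_append, List.isEmpty_eq_false_iff.mpr hrest]
      simp only [Bool.false_eq_true, if_false]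
      rw [sjoin_append "\n" (b ++ [""]) _ (by simp) hdl]
      rw [sjoin_append "\n" b [""] hbne (by simp), sjoin_singleton]
      rw [ih']
      show PySem.Str.join "\n" b ++ "\n" ++ "" ++ "\n" ++
          PySem.Str.join "\n\n" ((b' :: bs').map (PySem.Str.join "\n")) = _
      rw [show ((b' :: bs').map (PySem.Str.join "\n")) =
            PySem.Str.join "\n" b' :: bs'.map (PySem.Str.join "\n") from rfl,
          sjoin_cons_cons]
      rw [show ("\n\n" : String) = "\n" ++ "\n" from rfl]
      simp [String.append_empty, String.append_assoc]


-- ===== VERDICT (by name: the statement is the Claim_ definition above) =====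
theorem build_block_variant_b_py_spec : Claim_equal_build_block_variant_b_py := by
  intro rows _
  unfold Spec_build_block_variant_b_py
  have hkept : ∀ r ∈ rows.filter (fun r => pvDiv r != ""), pvDiv r ≠ "" := by
    intro r hr
    simpa using List.of_mem_filter hr
  have hbs : ∀ b ∈ (groupsSpec (rows.filter (fun r => pvDiv r != ""))).map
      (fun g => blockOf g.1 g.2), b ≠ [] ∧ ∀ x ∈ b, x ≠ "" := by
    intro b hb
    rcases List.mem_map.mp hb with ⟨g, hg, rfl⟩
    have hk : g.1 ≠ "" := groupsSpec_key_ne _ hkept g hg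
    exact ⟨List.cons_ne_nil _ _, fun x hx => mem_blockOf_ne hk hx⟩
  rw [A_char rows]
  unfold build_block_variant_b_py_alt
  simp only [bLoop_char _ _ _ hkept, List.nil_append]
  rw [show (groupsSpec (rows.filter (fun r => pvDiv r != ""))).flatMap
        (fun g => blockOf g.1 g.2 ++ [""]) =
      ((groupsSpec (rows.filter (fun r => pvDiv r != ""))).map
        (fun g => blockOf g.1 g.2)).flatMap (fun b => b ++ [""]) from
      (List.flatMap_map (fun g => blockOf g.1 g.2) (fun b => b ++ [""])
        (groupsSpec (rows.filter (fun r => pvDiv r != "")))).symm]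
  rw [popT_flat _ hbs, join_dropLast _ (fun b hb => (hbs b hb).1), List.map_map]
  rfl
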